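-- pv_equiv track=rewrite | github.com/EderSantana/seya | seya/utils.py | s2s_to_s2t
-- ===== SOURCE A (Python) =====
-- def s2s_to_s2t(sequences, targets):
--     '''
--     Transforms as sequence to sequence problem to a sequence to target.
--     It does so by replicating the input dataset a lot.
--     So use this only with small datasets.
--     Also, there is no way of passing the hidden states from one batch to another,
--     thus this is not the best way to solve this problem.
--     '''
--     X = []
--     Xrev = []  # reversed dataset
--     y = []
--     for seq, tar in zip(sequences, targets):
--         if not len(seq) == len(tar):
--             raise ValueError("Sequences and Targets must have the same length.")
--         for i in range(len(seq)):
--             X.append(seq[:i+1])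
--             if i == 0:
--                 Xrev.append(seq[::-1])
--             else:
--                 Xrev.append(seq[:i-1:-1])
--             # X.append(seq[:i+1])
--             # Xrev.append(seq[:i-1:-1])
--             y.append(tar[i])
--     return X, Xrev, y
-- ===== SOURCE B (Python) =====
-- def s2s_to_s2t(sequences, targets):
--     X = []
--     Xrev = []
--     y = []
--     for seq, tar in zip(sequences, targets):
--         if len(seq) != len(tar):
--             raise ValueError("Sequences and Targets must have the same length.")
--         pref = []
--         rs = seq[::-1]
--         for s_elem, t_elem in zip(seq, tar):
--             pref = pref + [s_elem]
--             X.append(pref)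
--             Xrev.append(rs)
--             rs = rs[:-1]
--             y.append(t_elem)
--     return X, Xrev, y
-- ===== Notes on version B (the rewrite author's own statement) =====
-- stated objective: alternative
-- what changed: Instead of recomputing each slice from an index (seq[:i+1], seq[::-1]/seq[:i-1:-1]), B walks each (seq,tar) pair element-wise maintaining two running accumulators -- a prefix grown by one element per step and a reversed suffix shrunk by dropping its last element per step -- so no positional indexing or index-based slicing remains and the i==0 special case disappears.
import Mathlib
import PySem

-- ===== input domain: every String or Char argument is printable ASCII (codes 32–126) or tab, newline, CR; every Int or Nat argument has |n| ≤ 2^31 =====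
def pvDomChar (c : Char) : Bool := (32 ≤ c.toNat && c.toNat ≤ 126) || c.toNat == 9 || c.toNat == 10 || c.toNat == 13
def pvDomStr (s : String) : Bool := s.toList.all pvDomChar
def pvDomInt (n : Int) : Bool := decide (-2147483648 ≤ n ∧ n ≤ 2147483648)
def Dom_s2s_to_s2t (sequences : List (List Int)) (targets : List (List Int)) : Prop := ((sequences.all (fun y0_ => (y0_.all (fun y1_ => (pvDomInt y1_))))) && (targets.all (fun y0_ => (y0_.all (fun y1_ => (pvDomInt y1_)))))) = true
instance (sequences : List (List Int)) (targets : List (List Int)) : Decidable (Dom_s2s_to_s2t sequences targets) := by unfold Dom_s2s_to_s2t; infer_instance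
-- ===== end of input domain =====

-- B replaces A's index-based slicing (seq[:i+1], seq[::-1]/seq[:i-1:-1] with an i==0 special
-- case) by an element-wise walk of each pair carrying two running accumulators: a growing
-- prefix and a shrinking reversed suffix; objective: alternative (same cost).

-- ===== PORT A =====
-- Literal port of A: one fold over zip(sequences, targets), inner fold over range(len(seq)),
-- appending to the three accumulators.  The Python 'raise ValueError' on a length mismatch is
-- excluded by Pre_; the port returns the accumulator unchanged there.
def s2s_to_s2t (sequences : List (List Int)) (targets : List (List Int)) : List (List Int) × List (List Int) × List Int :=
  (List.zip sequences targets).foldl (fun acc p =>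
    let seq := p.1
    let tar := p.2
    if seq.length ≠ tar.length then acc  -- Python: raise ValueError (outside Pre_)
    else
      (PySem.List.pyRange 0 (seq.length : Int) 1).foldl (fun acc2 i =>
        let X := acc2.1 ++ [PySem.List.slice seq none (some (i + 1))]          -- seq[:i+1]
        let Xrev :=
          if i == 0 then
            acc2.2.1 ++ [(PySem.List.slice? seq none none (-1)).getD []]       -- seq[::-1]
          else
            acc2.2.1 ++ [(PySem.List.slice? seq none (some (i - 1)) (-1)).getD []]  -- seq[:i-1:-1]
        let y := acc2.2.2 ++ [PySem.List.pyGetD tar i 0]                       -- tar[i] (in range under Pre_)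
        (X, Xrev, y)) acc)
    ([], [], [])

-- ===== PORT B =====
-- Literal port of Source B's inner loop: walk zip(seq, tar) carrying pref (grown by one element)
-- and rs (the reversed suffix, shrunk by rs[:-1] each step), appending to the accumulators.
def s2sInnerB (ps : List (Int × Int)) (pref rs : List Int)
    (acc : List (List Int) × List (List Int) × List Int) : List (List Int) × List (List Int) × List Int :=
  match ps with
  | [] => acc
  | (s, t) :: rest =>
      let pref' := pref ++ [s]                                   -- pref = pref + [s_elem]
      s2sInnerB rest pref' (PySem.List.slice rs none (some (-1)))  -- rs = rs[:-1]
        (acc.1 ++ [pref'], acc.2.1 ++ [rs], acc.2.2 ++ [t])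

-- Literal port of Source B's outer loop.
def s2s_to_s2t_alt (sequences : List (List Int)) (targets : List (List Int)) : List (List Int) × List (List Int) × List Int :=
  (List.zip sequences targets).foldl (fun acc p =>
    if p.1.length ≠ p.2.length then acc  -- Python: raise ValueError (outside Pre_)
    else
      s2sInnerB (List.zip p.1 p.2) [] ((PySem.List.slice? p.1 none none (-1)).getD []) acc)  -- rs = seq[::-1]
    ([], [], [])

-- ===== PRECONDITION & SPEC =====
-- Pre_ excludes exactly the inputs where some zipped (seq, tar) pair has unequal lengths:
-- there Python A raises ValueError (and B raises too).
def Pre_s2s_to_s2t (sequences : List (List Int)) (targets : List (List Int)) : Prop :=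
  ∀ p ∈ List.zip sequences targets, p.1.length = p.2.length
instance (sequences : List (List Int)) (targets : List (List Int)) : Decidable (Pre_s2s_to_s2t sequences targets) := by unfold Pre_s2s_to_s2t; infer_instance
def pvWitness_s2s_to_s2t : List (List Int) × List (List Int) := ([[1, 2, 3], [4]], [[7, 8, 9], [5]])
def Spec_s2s_to_s2t (sequences : List (List Int)) (targets : List (List Int)) (out : List (List Int) × List (List Int) × List Int) : Prop := out = s2s_to_s2t_alt sequences targets
instance (sequences : List (List Int)) (targets : List (List Int)) (out : List (List Int) × List (List Int) × List Int) : Decidable (Spec_s2s_to_s2t sequences targets out) := by unfold Spec_s2s_to_s2t; infer_instance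

-- ===== CLAIM (what is proved, stated in full; the proofs are below) =====
def Claim_equal_s2s_to_s2t : Prop := ∀ (sequences : List (List Int)) (targets : List (List Int)), Dom_s2s_to_s2t sequences targets → Pre_s2s_to_s2t sequences targets → Spec_s2s_to_s2t sequences targets (s2s_to_s2t sequences targets)

-- ===== LEMMAS AND PROOFS =====

-- Common specification of the three per-pair output lists, in Nat-range form.
def pvSpecX (s : List Int) : List (List Int) := (List.range s.length).map (fun k => s.take (k + 1))
def pvSpecR (s : List Int) : List (List Int) := (List.range s.length).map (fun k => (s.drop k).reverse)

-- ---- A-side lemmas ----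

-- Indices j, j-1, …, j-c+1 of xs, collected in that order.
theorem pv_filterMap_range_desc {α : Type} (xs : List α) (j c : Nat)
    (hc : c ≤ j + 1) (hj : j < xs.length) :
    (List.range c).filterMap (fun k => xs[j - k]?) = ((xs.drop (j + 1 - c)).take c).reverse := by
  induction c with
  | zero => simp
  | succ c ih =>
      rw [List.range_succ, List.filterMap_append, ih (by omega)]
      have hjc : j - c < xs.length := by omega
      have hdrop : xs.drop (j - c) = xs[j - c] :: xs.drop (j - c + 1) :=
        List.drop_eq_getElem_cons hjc
      have h1 : j + 1 - (c + 1) = j - c := by omega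
      have h2 : j - c + 1 = j + 1 - c := by omega
      rw [h1, hdrop, List.take_succ_cons, List.reverse_cons, h2]
      simp [List.getElem?_eq_getElem hjc]

-- A's seq[:i-1:-1] (1 ≤ i < len) is the reverse of the suffix from i.
theorem pv_sliceNeg_eq (xs : List Int) (i : Int) (h1 : 1 ≤ i) (h2 : i < (xs.length : Int)) :
    (PySem.List.slice? xs none (some (i - 1)) (-1)).getD [] = (xs.drop i.toNat).reverse := by
  have hn : 1 ≤ xs.length := by omega
  simp only [PySem.List.slice?, PySem.List.sliceIndices]
  have hneg : ¬ ((-1 : Int) = 0) := by omega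
  rw [if_neg hneg]
  have hlt : (-1 : Int) < 0 := by omega
  simp only [if_pos hlt]
  have hstop : ¬ (i - 1 < 0) := by omega
  rw [if_neg hstop]
  have hmin : min (i - 1) ((xs.length : Int) - 1) = i - 1 := by omega
  rw [hmin]
  have hcount : ((xs.length : Int) - 1 - (i - 1) + -(-1) - 1) / -(-1) = (xs.length : Int) - i := by
    norm_num
  have he : i - 1 < (xs.length : Int) - 1 ∨ ¬ (i - 1 < (xs.length : Int) - 1) := em _
  rcases he with he | he
  · rw [if_neg (by omega : ¬ (0:Int) < -1), if_pos he, hcount]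
    have hidx : ∀ k ∈ List.range ((xs.length : Int) - i).toNat,
        xs[(((xs.length : Int) - 1) + (-1) * (k : Int)).toNat]? = xs[(xs.length - 1) - k]? := by
      intro k hk
      have hk' : (k : Int) < (xs.length : Int) - i := by
        have := List.mem_range.mp hk; omega
      congr 1
      omega
    rw [List.filterMap_congr hidx,
        pv_filterMap_range_desc xs (xs.length - 1) ((xs.length : Int) - i).toNat (by omega) (by omega)]
    have hdt : xs.length - 1 + 1 - ((xs.length : Int) - i).toNat = i.toNat := by omega
    rw [hdt]
    have htk : (xs.drop i.toNat).take ((xs.length : Int) - i).toNat = xs.drop i.toNat := by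
      apply List.take_of_length_le
      simp [List.length_drop]
      omega
    rw [htk]
    simp
  · omega

-- One fold step appends one element to each of the three components.
theorem pv_foldl3 (L : List Int) (f g : Int → List Int) (h : Int → Int)
    (acc : List (List Int) × List (List Int) × List Int) :
    L.foldl (fun acc2 i => (acc2.1 ++ [f i], acc2.2.1 ++ [g i], acc2.2.2 ++ [h i])) acc
      = (acc.1 ++ L.map f, acc.2.1 ++ L.map g, acc.2.2 ++ L.map h) := by
  induction L generalizing acc with
  | nil => simp
  | cons x L ih => simp [List.foldl_cons, ih]

-- A map over pyRange 0 n 1 is a map over List.range n.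
theorem pv_pyRange_map {α : Type} (n : Nat) (f : Int → α) :
    (PySem.List.pyRange 0 (n : Int) 1).map f = (List.range n).map (fun (k : Nat) => f (k : Int)) := by
  have hn : ((n : Int) - 0).toNat = n := by omega
  rw [PySem.List.pyRange_one, hn, List.map_map]
  exact List.map_congr_left (fun k _ => by simp)

-- A's inner loop produces the spec lists, appended.
theorem pv_A_inner (seq tar : List Int) (hlen : seq.length = tar.length)
    (acc : List (List Int) × List (List Int) × List Int) :
    (PySem.List.pyRange 0 (seq.length : Int) 1).foldl (fun acc2 i =>
        let X := acc2.1 ++ [PySem.List.slice seq none (some (i + 1))]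
        let Xrev :=
          if i == 0 then
            acc2.2.1 ++ [(PySem.List.slice? seq none none (-1)).getD []]
          else
            acc2.2.1 ++ [(PySem.List.slice? seq none (some (i - 1)) (-1)).getD []]
        let y := acc2.2.2 ++ [PySem.List.pyGetD tar i 0]
        (X, Xrev, y)) acc
      = (acc.1 ++ pvSpecX seq, acc.2.1 ++ pvSpecR seq, acc.2.2 ++ tar) := by
  have hstep : (fun (acc2 : List (List Int) × List (List Int) × List Int) (i : Int) =>
        let X := acc2.1 ++ [PySem.List.slice seq none (some (i + 1))]
        let Xrev :=
          if i == 0 then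
            acc2.2.1 ++ [(PySem.List.slice? seq none none (-1)).getD []]
          else
            acc2.2.1 ++ [(PySem.List.slice? seq none (some (i - 1)) (-1)).getD []]
        let y := acc2.2.2 ++ [PySem.List.pyGetD tar i 0]
        (X, Xrev, y))
      = (fun acc2 i =>
        (acc2.1 ++ [PySem.List.slice seq none (some (i + 1))],
         acc2.2.1 ++ [if i == 0 then (PySem.List.slice? seq none none (-1)).getD []
                      else (PySem.List.slice? seq none (some (i - 1)) (-1)).getD []],
         acc2.2.2 ++ [PySem.List.pyGetD tar i 0])) := by
    funext acc2 i
    by_cases h0 : i == 0 <;> simp [h0]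
  rw [hstep, pv_foldl3]
  refine Prod.ext ?_ (Prod.ext ?_ ?_)
  · simp only [pv_pyRange_map, pvSpecX]
    congr 1
    apply List.map_congr_left
    intro k _
    have : ((k : Int) + 1) = ((k + 1 : Nat) : Int) := by push_cast; ring
    rw [this, PySem.List.slice_to_natCast]
  · simp only [pv_pyRange_map, pvSpecR]
    congr 1
    apply List.map_congr_left
    intro k hk
    have hk' : k < seq.length := List.mem_range.mp hk
    by_cases h0 : k = 0
    · subst h0
      simp [PySem.List.slice?_none_none_neg_one]
    · have h1 : (1 : Int) ≤ (k : Int) := by omega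
      have h2 : (k : Int) < (seq.length : Int) := by omega
      have hne : ((k : Int) == 0) = false := by simp; omega
      rw [hne]
      simp only [Bool.false_eq_true, if_false]
      rw [pv_sliceNeg_eq seq (k : Int) h1 h2]
      simp
  · simp only
    rw [hlen, PySem.List.map_pyGetD_pyRange_zero' tar 0]

-- ---- B-side lemmas ----

-- The lists s2sInnerB yields, described structurally.
def pvPrefs (pref : List Int) : List Int → List (List Int)
  | [] => []
  | a :: s => (pref ++ [a]) :: pvPrefs (pref ++ [a]) s

def pvRss (rs : List Int) : Nat → List (List Int)
  | 0 => []
  | n + 1 => rs :: pvRss rs.dropLast n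

theorem pv_B_inner (s : List Int) : ∀ (t pref rs : List Int)
    (acc : List (List Int) × List (List Int) × List Int), s.length = t.length →
    s2sInnerB (List.zip s t) pref rs acc
      = (acc.1 ++ pvPrefs pref s, acc.2.1 ++ pvRss rs s.length, acc.2.2 ++ t) := by
  induction s with
  | nil =>
      intro t pref rs acc h
      have : t = [] := List.eq_nil_of_length_eq_zero (by simpa using h.symm)
      subst this
      simp [s2sInnerB, pvPrefs, pvRss]
  | cons a s ih =>
      intro t pref rs acc h
      match t with
      | [] => simp at h
      | b :: t =>
          have h' : s.length = t.length := by simpa using h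
          simp only [List.zip_cons_cons, s2sInnerB, PySem.List.slice_to_neg_one]
          rw [ih t (pref ++ [a]) rs.dropLast _ h']
          simp [pvPrefs, pvRss]

theorem pv_prefs_eq (s : List Int) : ∀ pref : List Int,
    pvPrefs pref s = (List.range s.length).map (fun k => pref ++ s.take (k + 1)) := by
  induction s with
  | nil => intro pref; simp [pvPrefs]
  | cons a s ih =>
      intro pref
      rw [pvPrefs, ih (pref ++ [a])]
      simp only [List.length_cons, List.range_succ_eq_map, List.map_cons, List.map_map]
      simp [Function.comp, List.take_succ_cons]

theorem pv_rss_eq (s : List Int) :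
    pvRss s.reverse s.length = (List.range s.length).map (fun k => (s.drop k).reverse) := by
  induction s with
  | nil => simp [pvRss]
  | cons a s ih =>
      have hdl : (a :: s).reverse.dropLast = s.reverse := by
        simp [List.reverse_cons]
      rw [List.length_cons, pvRss, hdl, ih]
      simp only [List.range_succ_eq_map, List.map_cons, List.map_map]
      simp [Function.comp]

-- B's inner call from pref = [] and rs = seq[::-1] yields exactly the spec lists.
theorem pv_B_inner_spec (seq tar : List Int) (hlen : seq.length = tar.length)
    (acc : List (List Int) × List (List Int) × List Int) :
    s2sInnerB (List.zip seq tar) [] ((PySem.List.slice? seq none none (-1)).getD []) acc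
      = (acc.1 ++ pvSpecX seq, acc.2.1 ++ pvSpecR seq, acc.2.2 ++ tar) := by
  rw [PySem.List.slice?_none_none_neg_one, Option.getD_some,
      pv_B_inner seq tar [] seq.reverse acc hlen, pv_prefs_eq, pv_rss_eq]
  simp [pvSpecX, pvSpecR]

-- ---- Outer loops: both folds over any pair list with equal lengths yield the same triple ----

theorem pv_A_outer (L : List (List Int × List Int)) (hL : ∀ p ∈ L, p.1.length = p.2.length)
    (acc : List (List Int) × List (List Int) × List Int) :
    L.foldl (fun acc p =>
      let seq := p.1
      let tar := p.2
      if seq.length ≠ tar.length then acc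
      else
        (PySem.List.pyRange 0 (seq.length : Int) 1).foldl (fun acc2 i =>
          let X := acc2.1 ++ [PySem.List.slice seq none (some (i + 1))]
          let Xrev :=
            if i == 0 then
              acc2.2.1 ++ [(PySem.List.slice? seq none none (-1)).getD []]
            else
              acc2.2.1 ++ [(PySem.List.slice? seq none (some (i - 1)) (-1)).getD []]
          let y := acc2.2.2 ++ [PySem.List.pyGetD tar i 0]
          (X, Xrev, y)) acc) acc
      = (acc.1 ++ L.flatMap (fun p => pvSpecX p.1),
         acc.2.1 ++ L.flatMap (fun p => pvSpecR p.1),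
         acc.2.2 ++ L.flatMap (fun p => p.2)) := by
  induction L generalizing acc with
  | nil => simp
  | cons p L ih =>
      have hp : p.1.length = p.2.length := hL p (List.mem_cons_self ..)
      rw [List.foldl_cons, if_neg (by omega), pv_A_inner p.1 p.2 hp acc,
          ih (fun q hq => hL q (List.mem_cons_of_mem _ hq))]
      simp

theorem pv_B_outer (L : List (List Int × List Int)) (hL : ∀ p ∈ L, p.1.length = p.2.length)
    (acc : List (List Int) × List (List Int) × List Int) :
    L.foldl (fun acc p =>
      if p.1.length ≠ p.2.length then acc
      else
        s2sInnerB (List.zip p.1 p.2) [] ((PySem.List.slice? p.1 none none (-1)).getD []) acc) acc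
      = (acc.1 ++ L.flatMap (fun p => pvSpecX p.1),
         acc.2.1 ++ L.flatMap (fun p => pvSpecR p.1),
         acc.2.2 ++ L.flatMap (fun p => p.2)) := by
  induction L generalizing acc with
  | nil => simp
  | cons p L ih =>
      have hp : p.1.length = p.2.length := hL p (List.mem_cons_self ..)
      rw [List.foldl_cons, if_neg (by omega), pv_B_inner_spec p.1 p.2 hp acc,
          ih (fun q hq => hL q (List.mem_cons_of_mem _ hq))]
      simp

-- ===== VERDICT (by name: the statement is the Claim_ definition above) =====
theorem s2s_to_s2t_spec : Claim_equal_s2s_to_s2t := by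
  intro sequences targets _ hpre
  unfold Spec_s2s_to_s2t s2s_to_s2t s2s_to_s2t_alt
  rw [pv_A_outer (List.zip sequences targets) hpre ([], [], []),
      pv_B_outer (List.zip sequences targets) hpre ([], [], [])]
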